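-- pv_equiv track=rewrite | github.com/augini/algorithms_ds | BinarySearch/arrays/remove_duplicate_entries.py | solve
-- ===== SOURCE A (Python) =====
-- from collections import Counter
--
-- def solve(nums):
--     _c = Counter(nums)
--     result = []
--
--     for i in range(len(nums)):
--         if _c[nums[i]] > 0:
--             result.append(nums[i])
--
--             if _c[nums[i]] == 2:
--                 _c[nums[i]] = 0
--             else:
--                 _c[nums[i]] = _c[nums[i]] - 1
--
--     return result
-- ===== SOURCE B (Python) =====
-- def solve(nums):
--     # last occurrence index of each value
--     last = {}
--     for i, x in enumerate(nums):
--         last[x] = i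
--     # keep x unless it was seen before and never occurs again (i.e. this is
--     # the last occurrence of a value appearing at least twice)
--     seen = set()
--     out = []
--     for i, x in enumerate(nums):
--         if x not in seen or i < last[x]:
--             out.append(x)
--         seen.add(x)
--     return out
-- ===== Notes on version B (the rewrite author's own statement) =====
-- stated objective: alternative
-- what changed: Replaces A's Counter-with-sentinel-decrement loop by a last-occurrence index table plus a seen-set filter: keep an element unless it was seen before and its index equals its value's last index.
import Mathlib
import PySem

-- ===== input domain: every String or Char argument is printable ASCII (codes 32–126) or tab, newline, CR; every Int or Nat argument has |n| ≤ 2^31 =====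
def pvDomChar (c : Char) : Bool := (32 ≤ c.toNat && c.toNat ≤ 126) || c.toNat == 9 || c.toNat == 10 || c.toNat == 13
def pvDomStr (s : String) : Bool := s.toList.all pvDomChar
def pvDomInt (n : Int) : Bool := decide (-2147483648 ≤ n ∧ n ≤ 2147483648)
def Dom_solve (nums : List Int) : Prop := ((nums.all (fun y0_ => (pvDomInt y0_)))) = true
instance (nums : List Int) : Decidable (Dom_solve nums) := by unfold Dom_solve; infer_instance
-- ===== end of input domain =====

-- B drops the last occurrence of every repeated value via a last-occurrence index table
-- plus a seen-set filter instead of A's Counter-with-sentinel-decrement loop (objective: alternative).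

-- ===== PORT A =====
-- one loop iteration of A: state (counter _c, result), v = nums[i]
def stepA (st : PySem.Dict Int Int × List Int) (v : Int) : PySem.Dict Int Int × List Int :=
  if st.1.getD v 0 > 0 then
    if st.1.getD v 0 = 2 then (st.1.insert v 0, st.2 ++ [v])
    else (st.1.insert v (st.1.getD v 0 - 1), st.2 ++ [v])
  else st

def solve (nums : List Int) : List Int :=
  ((PySem.List.pyRange 0 (nums.length : Int) 1).foldl
    (fun st i => stepA st (PySem.List.pyGetD nums i 0))
    (PySem.Dict.counter nums, [])).2

-- ===== PORT B =====
-- last[x] = i loop body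
def insLast (d : PySem.Dict Int Int) (p : Int × Int) : PySem.Dict Int Int := d.insert p.2 p.1

-- second loop body: state (seen, out); last[x] ported as getD (every x ∈ nums is a key of last, so exact)
def stepB (last : PySem.Dict Int Int) (st : PySem.Set Int × List Int) (p : Int × Int) :
    PySem.Set Int × List Int :=
  (PySem.Set.add st.1 p.2,
   if !(PySem.Set.contains st.1 p.2) || decide (p.1 < last.getD p.2 0) then st.2 ++ [p.2] else st.2)

def solve_alt (nums : List Int) : List Int :=
  let last := (PySem.List.enumerate nums 0).foldl insLast PySem.Dict.empty
  ((PySem.List.enumerate nums 0).foldl (stepB last) (PySem.Set.empty, [])).2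

-- ===== PRECONDITION & SPEC =====
def Spec_solve (nums : List Int) (out : List Int) : Prop := out = solve_alt nums
instance (nums : List Int) (out : List Int) : Decidable (Spec_solve nums out) := by unfold Spec_solve; infer_instance

-- ===== CLAIM (what is proved, stated in full; the proofs are below) =====
def Claim_equal_solve : Prop := ∀ (nums : List Int), Dom_solve nums → Spec_solve nums (solve nums)

-- ===== LEMMAS AND PROOFS =====

-- common characterisation: keep x unless it occurred in pre and never occurs again
def specGo : List Int → List Int → List Int
  | _, [] => []
  | pre, x :: t => (if x ∉ pre ∨ x ∈ t then [x] else []) ++ specGo (pre ++ [x]) t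

lemma loopA (rest : List Int) : ∀ (pre : List Int) (c : PySem.Dict Int Int) (acc : List Int),
    (∀ x : Int, c.getD x 0 = if x ∈ pre ∧ rest.count x ≤ 1 then 0 else (rest.count x : Int)) →
    (rest.foldl stepA (c, acc)).2 = acc ++ specGo pre rest := by
  induction rest with
  | nil => intro pre c acc _; simp [specGo]
  | cons x t ih =>
    intro pre c acc h
    have hx := h x
    simp only [List.count_cons_self] at hx
    rw [List.foldl_cons, specGo]
    by_cases h1 : x ∈ pre ∧ t.count x = 0
    · -- counter is 0: element skipped, spec condition false
      have hc0 : c.getD x 0 = 0 := by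
        rw [hx, if_pos ⟨h1.1, by omega⟩]
      have hcond : ¬ (x ∉ pre ∨ x ∈ t) := by
        simp [h1.1, List.count_eq_zero.mp h1.2]
      have hstep : stepA (c, acc) x = (c, acc) := by
        simp [stepA, hc0]
      rw [hstep, if_neg hcond, List.nil_append]
      apply ih
      intro y
      by_cases hy : y = x
      · subst hy; rw [hc0, if_pos ⟨by simp, by omega⟩]
      · rw [h y]
        have hxy : ¬ x = y := fun h' => hy h'.symm
        simp [hxy, hy]
    · -- counter is positive: element kept
      have hcv : c.getD x 0 = (t.count x : Int) + 1 := by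
        rw [hx, if_neg]
        · push_cast; ring
        · intro hco; exact h1 ⟨hco.1, by omega⟩
      have hpos : c.getD x 0 > 0 := by rw [hcv]; positivity
      have hcond : x ∉ pre ∨ x ∈ t := by
        by_cases hm : x ∈ pre
        · right
          rcases Nat.eq_zero_or_pos (t.count x) with h0 | hp
          · exact absurd ⟨hm, h0⟩ h1
          · exact List.count_pos_iff.mp hp
        · left; exact hm
      have hinv : ∀ w : Int, (w = if t.count x ≤ 1 then 0 else (t.count x : Int)) →
          ∀ y : Int, (c.insert x w).getD y 0
            = if y ∈ pre ++ [x] ∧ t.count y ≤ 1 then 0 else (t.count y : Int) := by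
        intro w hw y
        by_cases hy : y = x
        · subst hy
          rw [PySem.Dict.getD_insert_self, hw]
          by_cases hle : t.count y ≤ 1
          · rw [if_pos hle, if_pos ⟨by simp, hle⟩]
          · rw [if_neg hle, if_neg (by tauto)]
        · rw [PySem.Dict.getD_insert, if_neg hy, h y]
          have hxy : ¬ x = y := fun h' => hy h'.symm
          simp [hxy, hy]
      rw [if_pos hcond]
      by_cases h2 : c.getD x 0 = 2
      · have hct : t.count x = 1 := by omega
        have hstep : stepA (c, acc) x = (c.insert x 0, acc ++ [x]) := by
          simp [stepA, h2]
        rw [hstep, ih _ _ _ (hinv 0 (by rw [if_pos (by omega)]))]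
        simp
      · have hct : t.count x ≠ 1 := by omega
        have hstep : stepA (c, acc) x
            = (c.insert x (c.getD x 0 - 1), acc ++ [x]) := by
          simp [stepA, hpos, h2]
        have hval : c.getD x 0 - 1 = if t.count x ≤ 1 then 0 else (t.count x : Int) := by
          rw [hcv]
          by_cases hle : t.count x ≤ 1
          · rw [if_pos hle]
            have : t.count x = 0 := by omega
            simp [this]
          · rw [if_neg hle]; ring
        rw [hstep, ih _ _ _ (hinv _ hval)]
        simp

lemma solve_eq_spec (nums : List Int) : solve nums = specGo [] nums := by
  unfold solve
  rw [PySem.List.foldl_pyRange_zero_pyGetD' nums 0 stepA (PySem.Dict.counter nums, [])]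
  rw [loopA nums [] _ [] (by
    intro x
    rw [PySem.Dict.getD_counter]
    simp)]
  simp

lemma lastGT (rest : List Int) : ∀ (s i : Int) (d : PySem.Dict Int Int) (x : Int), i < s →
    (i < ((PySem.List.enumerate rest s).foldl insLast d).getD x 0 ↔ (x ∈ rest ∨ i < d.getD x 0)) := by
  induction rest with
  | nil => intro s i d x _; simp [PySem.List.enumerate_nil]
  | cons y t ih =>
    intro s i d x hs
    rw [PySem.List.enumerate_cons, List.foldl_cons]
    have hstep : insLast d (s, y) = d.insert y s := rfl
    rw [hstep, ih (s + 1) i _ x (by omega)]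
    rw [PySem.Dict.getD_insert]
    by_cases hxy : x = y
    · subst hxy
      simp [hs]
    · rw [if_neg hxy]
      simp only [List.mem_cons]
      tauto

lemma loopB (rest : List Int) : ∀ (pre : List Int) (seen : PySem.Set Int) (acc : List Int),
    (∀ y : Int, y ∈ seen ↔ y ∈ pre) →
    ((PySem.List.enumerate rest (pre.length : Int)).foldl
        (stepB ((PySem.List.enumerate (pre ++ rest) 0).foldl insLast PySem.Dict.empty))
        (seen, acc)).2
      = acc ++ specGo pre rest := by
  induction rest with
  | nil => intro pre seen acc _; simp [PySem.List.enumerate_nil, specGo]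
  | cons x t ih =>
    intro pre seen acc hseen
    -- decompose the last-index dict over pre ++ x :: t
    have hlast : (PySem.List.enumerate (pre ++ x :: t) 0).foldl insLast PySem.Dict.empty
        = (PySem.List.enumerate (x :: t) (pre.length : Int)).foldl insLast
            ((PySem.List.enumerate pre 0).foldl insLast PySem.Dict.empty) := by
      rw [PySem.List.enumerate_append, List.foldl_append]
      norm_num
    set d1 := (PySem.List.enumerate pre 0).foldl insLast PySem.Dict.empty with hd1
    set L := (PySem.List.enumerate (pre ++ x :: t) 0).foldl insLast PySem.Dict.empty with hL
    have hLgt : ((pre.length : Int) < L.getD x 0) ↔ x ∈ t := by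
      rw [hlast, PySem.List.enumerate_cons, List.foldl_cons]
      have hstep : insLast d1 ((pre.length : Int), x) = d1.insert x (pre.length : Int) := rfl
      rw [hstep, lastGT t ((pre.length : Int) + 1) (pre.length : Int) _ x (by omega)]
      rw [PySem.Dict.getD_insert_self]
      simp
    have hcont : PySem.Set.contains seen x = decide (x ∈ pre) := by
      by_cases hm : x ∈ pre
      · simp only [hm, decide_true]
        exact (PySem.Set.contains_iff seen x).mpr ((hseen x).mpr hm)
      · simp only [hm, decide_false]
        by_contra hne
        have : PySem.Set.contains seen x = true := by
          cases hb : PySem.Set.contains seen x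
          · exact absurd hb hne
          · rfl
        exact hm ((hseen x).mp ((PySem.Set.contains_iff seen x).mp this))
    rw [PySem.List.enumerate_cons, List.foldl_cons, specGo]
    have hcondval : (!(PySem.Set.contains seen x) || decide ((pre.length : Int) < L.getD x 0))
        = decide (x ∉ pre ∨ x ∈ t) := by
      rw [hcont]
      by_cases hc : x ∉ pre ∨ x ∈ t
      · rcases hc with hc' | hc' <;> simp [hc', hLgt]
      · have h1 : x ∈ pre := by tauto
        have h2 : x ∉ t := by tauto
        simp [h1, h2, hLgt]
    have hstepB : stepB L (seen, acc) ((pre.length : Int), x)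
        = (PySem.Set.add seen x,
           if x ∉ pre ∨ x ∈ t then acc ++ [x] else acc) := by
      rw [stepB]
      simp only [hcondval]
      by_cases hc : x ∉ pre ∨ x ∈ t
      · simp [hc]
      · simp [hc]
    rw [hstepB]
    have hrec := ih (pre ++ [x]) (PySem.Set.add seen x)
      (if x ∉ pre ∨ x ∈ t then acc ++ [x] else acc)
      (by
        intro y
        rw [PySem.Set.mem_add]
        simp only [List.mem_append, List.mem_singleton]
        constructor
        · rintro (h' | h')
          · exact Or.inl ((hseen y).mp h')
          · exact Or.inr h'
        · rintro (h' | h')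
          · exact Or.inl ((hseen y).mpr h')
          · exact Or.inr h')
    have hlen : ((pre ++ [x]).length : Int) = (pre.length : Int) + 1 := by simp
    have happ : (pre ++ [x]) ++ t = pre ++ x :: t := by simp
    rw [hlen, happ] at hrec
    rw [← hL] at hrec
    rw [hrec]
    by_cases hc : x ∉ pre ∨ x ∈ t
    · simp [hc]
    · simp [hc]

lemma alt_eq_spec (nums : List Int) : solve_alt nums = specGo [] nums := by
  unfold solve_alt
  have h := loopB nums [] PySem.Set.empty []
    (by intro y; simp [PySem.Set.empty])
  simp only [List.nil_append, List.length_nil, Nat.cast_zero] at h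
  exact h

-- ===== VERDICT (by name: the statement is the Claim_ definition above) =====
theorem solve_spec : Claim_equal_solve := by
  intro nums _
  unfold Spec_solve
  rw [solve_eq_spec, alt_eq_spec]
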